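-- pv_equiv track=rewrite | github.com/igorjplino/PythonSolutionsExercises | Chapter1/Reinforcement/r1.6.py | sum_odd_squares
-- ===== SOURCE A (Python) =====
-- def sum_odd_squares(k):
--     sum = 0
--     if k <= 0:
--         return sum
--     for i in range(1, k):
--         if i % 2 == 1:
--             sum += i * i
--     return sum
-- ===== SOURCE B (Python) =====
-- def sum_odd_squares(k):
--     # closed form: with n = max(k // 2, 0) odd numbers below k,
--     # their squares sum to n * (2n - 1) * (2n + 1) // 3
--     n = max(k // 2, 0)
--     return n * (2 * n - 1) * (2 * n + 1) // 3
-- ===== Notes on version B (the rewrite author's own statement) =====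
-- stated objective: faster
-- what changed: Replaced the O(k) loop over range(1,k) by the closed-form formula n(2n-1)(2n+1)/3 with n = max(k//2, 0).
import Mathlib
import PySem

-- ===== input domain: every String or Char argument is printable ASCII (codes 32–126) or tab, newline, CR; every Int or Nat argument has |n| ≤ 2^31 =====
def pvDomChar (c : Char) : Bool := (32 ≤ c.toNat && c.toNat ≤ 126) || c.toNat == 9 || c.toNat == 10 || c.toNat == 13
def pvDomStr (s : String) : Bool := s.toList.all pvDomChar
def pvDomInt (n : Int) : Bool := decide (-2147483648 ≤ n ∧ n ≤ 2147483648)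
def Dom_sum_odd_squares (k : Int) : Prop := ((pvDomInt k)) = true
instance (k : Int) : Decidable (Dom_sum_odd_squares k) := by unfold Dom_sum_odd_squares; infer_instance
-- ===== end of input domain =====

-- B replaces A's O(k) loop by the closed form n(2n-1)(2n+1)//3 with n = max(k//2, 0) (faster).

-- ===== PORT A =====
def sum_odd_squares (k : Int) : Int :=
  let sum : Int := 0
  if k ≤ 0 then sum
  else
    (PySem.List.pyRange 1 k 1).foldl
      (fun s i => if PySem.Int.mod i 2 = 1 then s + i * i else s) sum

-- ===== PORT B =====
def sum_odd_squares_alt (k : Int) : Int :=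
  let n : Int := max (PySem.Int.floordiv k 2) 0
  PySem.Int.floordiv (n * (2 * n - 1) * (2 * n + 1)) 3

-- ===== PRECONDITION & SPEC =====
def Spec_sum_odd_squares (k : Int) (out : Int) : Prop := out = sum_odd_squares_alt k
instance (k : Int) (out : Int) : Decidable (Spec_sum_odd_squares k out) := by unfold Spec_sum_odd_squares; infer_instance

-- ===== CLAIM (what is proved, stated in full; the proofs are below) =====
def Claim_equal_sum_odd_squares : Prop := ∀ (k : Int), Dom_sum_odd_squares k → Spec_sum_odd_squares k (sum_odd_squares k)

-- ===== LEMMAS AND PROOFS =====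

-- loop characterisation: three times A's loop value over range(1,m) equals n(2n-1)(2n+1), n = m/2
theorem pv_loop_key (m : Nat) :
    3 * ((PySem.List.pyRange 1 (m : Int) 1).foldl
      (fun s i => if PySem.Int.mod i 2 = 1 then s + i * i else s) 0)
    = ((m / 2 : Nat) : Int) * (2 * ((m / 2 : Nat) : Int) - 1) * (2 * ((m / 2 : Nat) : Int) + 1) := by
  induction m with
  | zero => simp [PySem.List.pyRange]
  | succ m ih =>
    rcases Nat.eq_zero_or_pos m with hm0 | hmpos
    · subst hm0
      simp [PySem.List.pyRange]
    · have h1 : (1 : Int) ≤ (m : Int) := by exact_mod_cast hmpos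
      have hsr : PySem.List.pyRange 1 ((m : Int) + 1) 1
          = PySem.List.pyRange 1 (m : Int) 1 ++ [(m : Int)] :=
        PySem.List.pyRange_one_succ_right h1
      have hcast : ((m + 1 : Nat) : Int) = (m : Int) + 1 := by push_cast; ring
      rw [hcast, hsr, List.foldl_append]
      have hmod : PySem.Int.mod (m : Int) 2 = ((m % 2 : Nat) : Int) := by
        exact_mod_cast PySem.Int.mod_natCast m 2
      set S : Int := (PySem.List.pyRange 1 (m : Int) 1).foldl
        (fun s i => if PySem.Int.mod i 2 = 1 then s + i * i else s) 0 with hS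
      simp only [List.foldl_cons, List.foldl_nil]
      rcases Nat.even_or_odd m with ⟨t, ht⟩ | ⟨t, ht⟩
      · -- m = 2t even: no addition, n unchanged
        have hmo : m % 2 = 0 := by omega
        have hdiv : (m + 1) / 2 = m / 2 := by omega
        rw [hmod, hmo, hdiv]
        simp only [Nat.cast_zero]
        rw [if_neg (by decide)]
        exact ih
      · -- m = 2t+1 odd: add m², n grows by one
        have hmo : m % 2 = 1 := by omega
        rw [hmod, hmo]
        simp only [Nat.cast_one, if_pos]
        have h2 : (m + 1) / 2 = t + 1 := by omega
        have h3 : m / 2 = t := by omega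
        rw [h2]
        rw [h3] at ih
        have hmt : (m : Int) = 2 * (t : Int) + 1 := by exact_mod_cast congrArg Nat.cast ht
        push_cast
        linear_combination ih + (6 * (t:Int) + 3 + 3 * (m:Int)) * hmt

-- ===== VERDICT (by name: the statement is the Claim_ definition above) =====
theorem sum_odd_squares_spec : Claim_equal_sum_odd_squares := by
  intro k _
  unfold Spec_sum_odd_squares
  by_cases hk : k ≤ 0
  · have hfd : PySem.Int.floordiv k 2 = k / 2 := PySem.Int.floordiv_eq_ediv_of_pos (by norm_num)
    have hmax : max (PySem.Int.floordiv k 2) 0 = 0 := by rw [hfd]; omega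
    simp only [sum_odd_squares_alt, sum_odd_squares, hmax, if_pos hk]
    norm_num [PySem.Int.floordiv]
  · push Not at hk
    obtain ⟨m, rfl⟩ : ∃ m : Nat, k = (m : Int) := ⟨k.toNat, by omega⟩
    have hfd : PySem.Int.floordiv (m : Int) 2 = ((m / 2 : Nat) : Int) := by
      exact_mod_cast PySem.Int.floordiv_natCast m 2
    have hmax : max (PySem.Int.floordiv (m : Int) 2) 0 = ((m / 2 : Nat) : Int) := by
      rw [hfd]; exact max_eq_left (by positivity)
    have hkey := pv_loop_key m
    simp only [sum_odd_squares_alt, sum_odd_squares, hmax, if_neg (not_le.mpr hk)]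
    rw [← hkey, PySem.Int.floordiv_eq_ediv_of_pos (by norm_num : (0:Int) < 3),
      Int.mul_ediv_cancel_left _ (by norm_num)]
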